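-- pv_equiv track=rewrite | github.com/Chaudhary626/Bot1 | utils/ai_moderation.py | scan_text
-- ===== SOURCE A (Python) =====
-- FORBIDDEN_KEYWORDS = [
--     "18+", "adult", "nsfw", "xxx", "crypto", "scam", "hack",
--     "free money", "get rich quick", "misleading"
-- ]
--
-- def scan_text(text: str) -> bool:
--     """
--     Scans text for forbidden keywords.
--     Returns:
--         True if content is safe.
--         False if content is unsafe.
--     """
--     if not text:
--         return True
--
--     lower_text = text.lower()
--     for keyword in FORBIDDEN_KEYWORDS:
--         if keyword in lower_text:
--             return False
--     return True
-- ===== SOURCE B (Python) =====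
-- FORBIDDEN_KEYWORDS = [
--     "18+", "adult", "nsfw", "xxx", "crypto", "scam", "hack",
--     "free money", "get rich quick", "misleading"
-- ]
--
-- def scan_text(text: str) -> bool:
--     # Single left-to-right position scan: at each index, test whether any
--     # forbidden keyword starts there (prefix match), instead of A's
--     # per-keyword full substring search over the whole text.
--     lower_text = text.lower()
--     for i in range(len(lower_text)):
--         for keyword in FORBIDDEN_KEYWORDS:
--             if lower_text.startswith(keyword, i):
--                 return False
--     return True
-- ===== Notes on version B (the rewrite author's own statement) =====
-- stated objective: alternative
-- what changed: Replaces A's per-keyword whole-text substring searches with one left-to-right position scan that at each index checks whether any keyword starts there as a prefix, so the text is traversed once position-by-position.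
import Mathlib
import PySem

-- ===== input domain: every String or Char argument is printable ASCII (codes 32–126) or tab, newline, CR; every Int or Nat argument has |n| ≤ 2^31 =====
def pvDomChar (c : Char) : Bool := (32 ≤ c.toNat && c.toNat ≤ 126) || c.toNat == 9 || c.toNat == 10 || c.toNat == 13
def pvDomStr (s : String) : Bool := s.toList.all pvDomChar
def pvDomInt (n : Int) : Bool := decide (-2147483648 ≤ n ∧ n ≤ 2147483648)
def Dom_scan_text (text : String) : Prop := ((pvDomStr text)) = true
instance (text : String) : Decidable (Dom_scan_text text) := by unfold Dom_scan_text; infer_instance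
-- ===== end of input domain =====

-- B replaces A's per-keyword whole-text substring searches with a single
-- left-to-right position scan checking prefix matches at each index (alternative, same cost).

def FORBIDDEN_KEYWORDS : List String :=
  ["18+", "adult", "nsfw", "xxx", "crypto", "scam", "hack",
   "free money", "get rich quick", "misleading"]

-- ===== PORT A =====
-- the 'for keyword in FORBIDDEN_KEYWORDS: if keyword in lower_text: return False' loop
def scanA_loop : List String → List Char → Bool
  | [], _ => true
  | kw :: rest, lt => if PySem.Chars.isIn kw.toList lt then false else scanA_loop rest lt

def scan_text (text : String) : Bool :=
  if text.toList = [] then true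
  else scanA_loop FORBIDDEN_KEYWORDS (PySem.Chars.lower text.toList)

-- ===== PORT B =====
-- the position scan: walk the lowered text suffix by suffix (index i ↦ suffix),
-- at each position test 'lower_text.startswith(keyword, i)' for every keyword
def scanB_loop : List Char → Bool
  | [] => true
  | c :: rest =>
    if FORBIDDEN_KEYWORDS.any (fun kw => PySem.Chars.startswith (c :: rest) kw.toList)
    then false else scanB_loop rest

def scan_text_alt (text : String) : Bool :=
  scanB_loop (PySem.Chars.lower text.toList)

-- ===== PRECONDITION & SPEC =====
def Spec_scan_text (text : String) (out : Bool) : Prop := out = scan_text_alt text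
instance (text : String) (out : Bool) : Decidable (Spec_scan_text text out) := by unfold Spec_scan_text; infer_instance

-- ===== CLAIM (what is proved, stated in full; the proofs are below) =====
def Claim_equal_scan_text : Prop := ∀ (text : String), Dom_scan_text text → Spec_scan_text text (scan_text text)

-- ===== LEMMAS AND PROOFS =====

theorem scanA_loop_eq_false_iff (K : List String) (lt : List Char) :
    scanA_loop K lt = false ↔ ∃ kw ∈ K, kw.toList <:+: lt := by
  induction K with
  | nil => simp [scanA_loop]
  | cons kw rest ih =>
    simp only [scanA_loop]
    split_ifs with h
    · simp only [PySem.Chars.isIn_iff_infix] at h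
      simp [h]
    · rw [ih]
      rw [Bool.not_eq_true, PySem.Chars.isIn_eq_false_iff] at h
      constructor
      · rintro ⟨k, hk, hi⟩; exact ⟨k, by simp [hk], hi⟩
      · rintro ⟨k, hk, hi⟩
        rcases List.mem_cons.mp hk with rfl | hk
        · exact absurd hi h
        · exact ⟨k, hk, hi⟩

theorem scanB_loop_eq_false_iff (lt : List Char) :
    scanB_loop lt = false ↔ ∃ kw ∈ FORBIDDEN_KEYWORDS, kw.toList <:+: lt := by
  induction lt with
  | nil =>
    simp only [scanB_loop, List.infix_nil]
    constructor
    · intro h; cases h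
    · rintro ⟨kw, hkw, hnil⟩
      fin_cases hkw <;> simp_all
  | cons c rest ih =>
    simp only [scanB_loop]
    split_ifs with h
    · simp only [List.any_eq_true, PySem.Chars.startswith_iff] at h
      rcases h with ⟨kw, hkw, hp⟩
      simp only [true_iff]
      exact ⟨kw, hkw, hp.isInfix⟩
    · rw [ih]
      rw [Bool.not_eq_true, List.any_eq_false] at h
      constructor
      · rintro ⟨kw, hkw, hi⟩
        exact ⟨kw, hkw, hi.trans (List.suffix_cons c rest).isInfix⟩
      · rintro ⟨kw, hkw, hi⟩
        rcases List.infix_cons_iff.mp hi with hp | hi'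
        · have hf := h kw hkw
          have ht : PySem.Chars.startswith (c :: rest) kw.toList = true :=
            (PySem.Chars.startswith_iff _ _).mpr hp
          simp [hf] at ht
        · exact ⟨kw, hkw, hi'⟩

-- ===== VERDICT (by name: the statement is the Claim_ definition above) =====
theorem scan_text_spec : Claim_equal_scan_text := by
  intro text _
  unfold Spec_scan_text scan_text scan_text_alt
  split_ifs with h
  · have : PySem.Chars.lower text.toList = [] := by simp [h, PySem.Chars.lower]
    simp [this, scanB_loop]
  · rcases hA : scanA_loop FORBIDDEN_KEYWORDS (PySem.Chars.lower text.toList) with _ | _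
    · rcases hB : scanB_loop (PySem.Chars.lower text.toList) with _ | _
      · rfl
      · exfalso
        rw [scanA_loop_eq_false_iff] at hA
        rw [← scanB_loop_eq_false_iff] at hA
        simp [hA] at hB
    · rcases hB : scanB_loop (PySem.Chars.lower text.toList) with _ | _
      · exfalso
        rw [scanB_loop_eq_false_iff] at hB
        rw [← scanA_loop_eq_false_iff] at hB
        simp [hB] at hA
      · rfl
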